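-- pv_equiv track=rewrite | github.com/Mistikan/yabackup | program.py | razmer
-- ===== SOURCE A (Python) =====
-- def razmer(size):#Функция возвращает main(главные папки(количество)) и a*255+i(внутренние папки(количество)).Полезно для создания счетчика прогресса.
--     a = size // 32640
--     residue = size % 32640
--     maxname = 255
--     size = 1
--     if residue == 0:
--         size = 0
--     else:
--         while residue >= maxname:
--             residue = residue - maxname
--             maxname = maxname-1
--             size += 1
--     if residue > 0:
--          main = a+1
--     return(main,a*255+size)
-- ===== SOURCE B (Python) =====
-- def razmer(size):
--     a = size // 32640
--     r = size % 32640
--     if r == 0: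
--         return (a, a * 255)
--     # largest k in [0,255] with sum of top k name-lengths (255+254+...) <= r,
--     # i.e. k*(511-k) <= 2*r, found by binary search instead of repeated subtraction
--     lo, hi = 0, 255
--     while lo < hi:
--         mid = (lo + hi + 1) // 2
--         if mid * (511 - mid) <= 2 * r:
--             lo = mid
--         else:
--             hi = mid - 1
--     k = lo
--     final = r - (255 * k - k * (k - 1) // 2)
--     main = a + 1 if final > 0 else a
--     return (main, a * 255 + 1 + k)
-- ===== Notes on version B (the rewrite author's own statement) =====
-- stated objective: alternative
-- what changed: Replaces the up-to-254-iteration repeated-subtraction while loop by a binary search for the largest k with k*(511-k) <= 2*residue (inverting the triangular partial sum), then computes the final residue in closed form.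
-- crash fix: A raises UnboundLocalError (local 'main' unset) exactly when size % 32640 is 0 or a partial sum 255+254+...+(256-k) = k*(511-k)/2, i.e. the final residue is 0; B returns (a, counts) with main = a there. — e.g. on razmer(0): A raises UnboundLocalError, B returns (0, 0)
import Mathlib
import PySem

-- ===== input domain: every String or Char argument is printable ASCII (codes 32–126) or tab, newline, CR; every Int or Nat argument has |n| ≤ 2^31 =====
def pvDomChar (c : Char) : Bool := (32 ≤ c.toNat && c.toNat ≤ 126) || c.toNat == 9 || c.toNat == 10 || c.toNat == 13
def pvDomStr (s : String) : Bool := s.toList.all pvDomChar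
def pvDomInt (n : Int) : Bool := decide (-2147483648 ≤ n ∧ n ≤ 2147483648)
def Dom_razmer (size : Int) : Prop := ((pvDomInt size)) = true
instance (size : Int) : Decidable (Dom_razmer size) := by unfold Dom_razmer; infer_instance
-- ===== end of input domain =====

-- B replaces A's repeated-subtraction while loop by a binary search inverting the
-- triangular partial sum; equivalence is claimed on inputs where A returns (Pre_).

-- ===== PORT A =====
-- the while loop: while residue >= maxname: residue -= maxname; maxname -= 1; size += 1
-- (fuel only makes the recursion total; 256 ≥ the iteration count on every admitted input)
def razmerLoop : Nat → Int → Int → Int → Int × Int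
  | 0, residue, _, sz => (residue, sz)
  | fuel + 1, residue, maxname, sz =>
    if maxname ≤ residue then razmerLoop fuel (residue - maxname) (maxname - 1) (sz + 1)
    else (residue, sz)

def razmer (size : Int) : Int × Int :=
  let a := PySem.Int.floordiv size 32640
  let residue := PySem.Int.mod size 32640
  if residue = 0 then
    -- Python raises UnboundLocalError here ('main' never assigned); excluded by Pre_
    (0, a * 255 + 0)
  else
    let p := razmerLoop 256 residue 255 1
    if 0 < p.1 then (a + 1, a * 255 + p.2)
    else (0, a * 255 + p.2)  -- Python raises UnboundLocalError here too; excluded by Pre_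

-- ===== PORT B =====
-- binary search: largest k in [0,255] with k*(511-k) <= 2*r  (fuel only for totality)
def bsLoop : Nat → Int → Int → Int → Int
  | 0, lo, _, _ => lo
  | fuel + 1, lo, hi, r2 =>
    if lo < hi then
      let mid := PySem.Int.floordiv (lo + hi + 1) 2
      if mid * (511 - mid) ≤ r2 then bsLoop fuel mid hi r2
      else bsLoop fuel lo (mid - 1) r2
    else lo

def razmer_alt (size : Int) : Int × Int :=
  let a := PySem.Int.floordiv size 32640
  let r := PySem.Int.mod size 32640
  if r = 0 then (a, a * 255)
  else
    let k := bsLoop 256 0 255 (2 * r)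
    let final := r - (255 * k - PySem.Int.floordiv (k * (k - 1)) 2)
    let main := if 0 < final then a + 1 else a
    (main, a * 255 + 1 + k)

-- ===== PRECONDITION & SPEC =====
-- Pre_ excludes exactly the inputs on which A raises UnboundLocalError: residue
-- size % 32640 equal to 0 or to a partial sum 255+254+...+(256-k) = k*(511-k)/2.
-- the inner condition ranges over k = 16*i + j = 0..255 (split so the Decidable
-- instance evaluates within the default recursion depth)
def Pre_razmer (size : Int) : Prop :=
  PySem.Int.mod size 32640 ≠ 0 ∧
  ∀ i : Nat, i < 16 → ∀ j : Nat, j < 16 →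
    16 * i + j = 0 ∨
      2 * PySem.Int.mod size 32640 ≠ ((16 * i + j : Nat) : Int) * (511 - ((16 * i + j : Nat) : Int))
instance (size : Int) : Decidable (Pre_razmer size) := by unfold Pre_razmer; infer_instance

def pvWitness_razmer : Int := 1

-- A raises UnboundLocalError (local 'main' unset) exactly when size % 32640 is 0 or a
-- partial sum k*(511-k)/2; B returns (a, counts) with main = a there.
def Raises_razmer (size : Int) : Prop :=
  PySem.Int.mod size 32640 = 0 ∨
  ∃ i : Nat, i < 16 ∧ ∃ j : Nat, j < 16 ∧ 16 * i + j ≠ 0 ∧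
    2 * PySem.Int.mod size 32640 = ((16 * i + j : Nat) : Int) * (511 - ((16 * i + j : Nat) : Int))
instance (size : Int) : Decidable (Raises_razmer size) := by unfold Raises_razmer; infer_instance

def pvRaiseWitness_razmer : Int := 0
def pvRaiseWitnessOut_razmer : Int × Int := (0, 0)

def Spec_razmer (size : Int) (out : Int × Int) : Prop := out = razmer_alt size
instance (size : Int) (out : Int × Int) : Decidable (Spec_razmer size out) := by unfold Spec_razmer; infer_instance

-- ===== CLAIM (what is proved, stated in full; the proofs are below) =====
def Claim_equal_razmer : Prop := ∀ (size : Int), Dom_razmer size → Pre_razmer size → Spec_razmer size (razmer size)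
def Claim_raises_razmer : Prop :=
  (∀ (size : Int), Dom_razmer size → Raises_razmer size → ¬ Pre_razmer size) ∧
  (Dom_razmer (pvRaiseWitness_razmer) ∧ Raises_razmer (pvRaiseWitness_razmer) ∧
    razmer_alt (pvRaiseWitness_razmer) = pvRaiseWitnessOut_razmer)

-- ===== LEMMAS AND PROOFS =====

-- k*(511-k) is twice the partial sum 255k - k(k-1)/2
lemma twice_tri (k : Int) :
    2 * (255 * k - PySem.Int.floordiv (k * (k - 1)) 2) = k * (511 - k) := by
  obtain ⟨m, hm⟩ : Even (k * (k - 1)) := by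
    have := Int.even_mul_succ_self (k - 1)
    simpa [mul_comm, sub_add_cancel] using this
  have h2 : PySem.Int.floordiv (k * (k - 1)) 2 = m := by
    rw [PySem.Int.floordiv_eq_ediv_of_pos (by norm_num), hm]; omega
  rw [h2]
  have hk2 : k * (k - 1) = k * k - k := by ring
  have : 2 * m = k * k - k := by omega
  nlinarith [this]

-- monotonicity of k ↦ k*(511-k) on [0,256]
lemma Smono {i j : Int} (_h0 : 0 ≤ i) (hij : i ≤ j) (hj : j ≤ 256) :
    i * (511 - i) ≤ j * (511 - j) := by
  rcases eq_or_lt_of_le hij with rfl | hlt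
  · exact le_refl _
  · nlinarith [mul_nonneg (by omega : (0:Int) ≤ j - i) (by omega : (0:Int) ≤ 511 - i - j)]

-- the stopping index both programs compute
def kOK (r k : Int) : Prop :=
  0 ≤ k ∧ k ≤ 255 ∧ k * (511 - k) ≤ 2 * r ∧ 2 * r < (k + 1) * (511 - (k + 1))

lemma kOK_exists {r : Int} (hr0 : 0 ≤ r) (hr : r < 32640) : ∃ k, kOK r k := by
  classical
  set S := (Finset.Icc (0 : Int) 255).filter (fun k => k * (511 - k) ≤ 2 * r) with hS
  have h0S : (0 : Int) ∈ S := by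
    simp [hS, Finset.mem_filter, Finset.mem_Icc]; omega
  have hSne : S.Nonempty := ⟨0, h0S⟩
  set k := S.max' hSne with hk
  have hmem : k ∈ S := S.max'_mem _
  simp only [hS, Finset.mem_filter, Finset.mem_Icc] at hmem
  refine ⟨k, hmem.1.1, hmem.1.2, hmem.2, ?_⟩
  by_contra hcon
  rw [not_lt] at hcon
  rcases eq_or_lt_of_le hmem.1.2 with h255 | hlt
  · -- k = 255: (k+1)*(511-(k+1)) = 65280 ≤ 2r < 65280
    rw [h255] at hcon; norm_num at hcon; omega
  · have hkS : k + 1 ∈ S := by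
      simp only [hS, Finset.mem_filter, Finset.mem_Icc]
      exact ⟨⟨by omega, by omega⟩, by linarith [hcon]⟩
    have := Finset.le_max' S (k + 1) hkS
    omega

-- A's loop, run from iteration j (residue r - t where 2t = j*(511-j)), stops at k
lemma loop_eval {r k : Int} (hk : kOK r k) :
    ∀ (fuel : Nat) (j t : Int), 0 ≤ j → j ≤ k → 2 * t = j * (511 - j) →
      (256 : Int) ≤ j + fuel →
      razmerLoop fuel (r - t) (255 - j) (1 + j) =
        (r - (255 * k - PySem.Int.floordiv (k * (k - 1)) 2), 1 + k) := by
  obtain ⟨hk0, hk255, hkP, hkQ⟩ := hk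
  intro fuel
  induction fuel with
  | zero => intro j t _ hjk _ hfuel; exfalso; push_cast at hfuel; omega
  | succ f ih =>
    intro j t h0 hjk ht hfuel
    have htk := twice_tri k
    rcases eq_or_lt_of_le hjk with rfl | hlt
    · -- j = k: the guard fails, loop stops
      have hstop : ¬ (255 - j ≤ r - t) := by nlinarith [htk]
      have ht' : t = 255 * j - PySem.Int.floordiv (j * (j - 1)) 2 := by linarith [htk]
      simp only [razmerLoop, if_neg hstop]
      rw [ht']
    · -- j < k: the guard holds, recurse at j+1
      have hcont : 255 - j ≤ r - t := by
        have hm := Smono (i := j + 1) (j := k) (by omega) (by omega) (by omega)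
        nlinarith [hm]
      have ht' : 2 * (t + (255 - j)) = (j + 1) * (511 - (j + 1)) := by linear_combination ht
      have := ih (j + 1) (t + (255 - j)) (by omega) (by omega) ht' (by push_cast at hfuel ⊢; omega)
      simp only [razmerLoop, if_pos hcont]
      have e1 : r - t - (255 - j) = r - (t + (255 - j)) := by ring
      have e2 : 255 - j - 1 = 255 - (j + 1) := by ring
      have e3 : 1 + j + 1 = 1 + (j + 1) := by ring
      rw [e1, e2, e3, this]

-- B's binary search converges to the same k
lemma bs_eval {r k : Int} (hk : kOK r k) :
    ∀ (fuel : Nat) (lo hi : Int), 0 ≤ lo → lo ≤ k → k ≤ hi → hi ≤ 255 →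
      hi - lo < (fuel : Int) → bsLoop fuel lo hi (2 * r) = k := by
  obtain ⟨hk0, hk255, hkP, hkQ⟩ := hk
  intro fuel
  induction fuel with
  | zero => intro lo hi _ h1 h2 _ hfuel; exfalso; push_cast at hfuel; omega
  | succ f ih =>
    intro lo hi hlo0 hlok hkhi hhi hfuel
    by_cases hlh : lo < hi
    · have hmid : PySem.Int.floordiv (lo + hi + 1) 2 = (lo + hi + 1) / 2 :=
        PySem.Int.floordiv_eq_ediv_of_pos (by norm_num)
      have hb1 : lo + 1 ≤ PySem.Int.floordiv (lo + hi + 1) 2 := by rw [hmid]; omega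
      have hb2 : PySem.Int.floordiv (lo + hi + 1) 2 ≤ hi := by rw [hmid]; omega
      by_cases hP : PySem.Int.floordiv (lo + hi + 1) 2 *
          (511 - PySem.Int.floordiv (lo + hi + 1) 2) ≤ 2 * r
      · have hmk : PySem.Int.floordiv (lo + hi + 1) 2 ≤ k := by
          by_contra hcon
          have := Smono (i := k + 1) (j := PySem.Int.floordiv (lo + hi + 1) 2)
            (by omega) (by omega) (by omega)
          omega
        have hrec := ih (PySem.Int.floordiv (lo + hi + 1) 2) hi (by omega) hmk hkhi hhi
          (by push_cast at hfuel ⊢; omega)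
        simp only [bsLoop, if_pos hlh]
        rw [if_pos hP]
        exact hrec
      · have hkm : k ≤ PySem.Int.floordiv (lo + hi + 1) 2 - 1 := by
          by_contra hcon
          have := Smono (i := PySem.Int.floordiv (lo + hi + 1) 2) (j := k)
            (by omega) (by omega) (by omega)
          omega
        have hrec := ih lo (PySem.Int.floordiv (lo + hi + 1) 2 - 1) hlo0 hlok hkm (by omega)
          (by push_cast at hfuel ⊢; omega)
        simp only [bsLoop, if_pos hlh]
        rw [if_neg hP]
        exact hrec
    · have hlk : lo = k := by omega
      subst hlk
      simp only [bsLoop, if_neg hlh]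

-- ===== VERDICT (by name: the statement is the Claim_ definition above) =====
theorem razmer_spec : Claim_equal_razmer := by
  intro size _ hpre
  obtain ⟨hne, hall⟩ := hpre
  show razmer size = razmer_alt size
  set r := PySem.Int.mod size 32640 with hrdef
  have hall' : ∀ k : Nat, k < 256 → 1 ≤ k → 2 * r ≠ (k : Int) * (511 - (k : Int)) := by
    intro k hklt hk1
    have h := hall (k / 16) (by omega) (k % 16) (by omega)
    have e : 16 * (k / 16) + k % 16 = k := by omega
    rw [e] at h
    rcases h with h0 | hg
    · omega
    · exact hg
  have hr0 : 0 ≤ r := PySem.Int.mod_nonneg size (by norm_num)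
  have hrlt : r < 32640 := PySem.Int.mod_lt size (by norm_num)
  obtain ⟨k, hk⟩ := kOK_exists hr0 hrlt
  set tk := 255 * k - PySem.Int.floordiv (k * (k - 1)) 2 with htkdef
  have htk := twice_tri k
  have hloop : razmerLoop 256 r 255 1 = (r - tk, 1 + k) := by
    have h := loop_eval hk 256 0 0 le_rfl hk.1 (by ring) (by norm_num)
    rw [sub_zero, sub_zero, add_zero] at h
    exact h
  have hbs : bsLoop 256 0 255 (2 * r) = k := by
    exact bs_eval hk 256 0 255 le_rfl hk.1 hk.2.1 le_rfl (by norm_num)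
  have hk0' := hk.1
  have hk255 := hk.2.1
  have hfin : 0 < r - tk := by
    have hge : tk ≤ r := by linarith [htk, hk.2.2.1]
    rcases eq_or_lt_of_le hge with heq | hlt
    · exfalso
      rcases eq_or_lt_of_le hk0' with hk0 | hkpos
      · -- k = 0 gives r = 0, contradicting hne
        have hz : k * (511 - k) = 0 := by rw [← hk0]; ring
        have htk0 : tk = 0 := by linarith [htk, hz]
        exact hne (by linarith [heq, htk0])
      · have hcast : ((k.toNat : Int)) = k := Int.toNat_of_nonneg hk0'
        have h := hall' k.toNat (by omega) (by omega)
        rw [hcast] at h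
        exact h (by linarith [htk])
    · omega
  simp only [razmer, razmer_alt, ← hrdef, if_neg hne, hloop, hbs, ← htkdef, if_pos hfin,
    Prod.mk.injEq]
  exact ⟨trivial, by ring⟩

@[simp] theorem razmer_raises : Claim_raises_razmer := by
  unfold Claim_raises_razmer
  constructor
  · intro size _ hraises hpre
    obtain ⟨hne, hall⟩ := hpre
    rcases hraises with h0 | ⟨i, hi, j, hj, hne0, hkeq⟩
    · exact hne h0
    · rcases hall i hi j hj with h0 | hg
      · exact hne0 h0
      · exact hg hkeq
  · refine ⟨by decide, by decide, by decide⟩
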